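-- pv_equiv track=rewrite | github.com/Schwafton/Practice-and-Interview-Problems | Practice and Interview Problems/META-all-practice-problems/main.py | min_length_substring
-- ===== SOURCE A (Python) =====
-- def min_length_substring(s, t):
--   # Write your code here
--   char_locations = []
--   for char in t:
--     for i in range(0, len(s)):
--       if char == s[i]:
--         if i not in char_locations:
--           char_locations.append(i)
--           break
--   char_locations.sort()
--   return char_locations[-1] - char_locations[0] + 1
-- ===== SOURCE B (Python) =====
-- def min_length_substring(s, t):
--     # One pass over s with a multiset of needed chars from t: pick index i
--     # exactly when s[i] is still needed; answer = last pick - first pick + 1.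
--     need = {}
--     for ch in t:
--         need[ch] = need.get(ch, 0) + 1
--     lo = None
--     hi = None
--     for i in range(len(s)):
--         ch = s[i]
--         k = need.get(ch, 0)
--         if k > 0:
--             need[ch] = k - 1
--             if lo is None:
--                 lo = i
--             hi = i
--     return hi - lo + 1
-- ===== Notes on version B (the rewrite author's own statement) =====
-- stated objective: faster
-- what changed: Replaces A's rescan of s from index 0 for every character of t (and the final sort plus indexing) by building a multiset of t's characters once and making a single counting pass over s that tracks the first and last picked index directly.
import Mathlib
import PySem

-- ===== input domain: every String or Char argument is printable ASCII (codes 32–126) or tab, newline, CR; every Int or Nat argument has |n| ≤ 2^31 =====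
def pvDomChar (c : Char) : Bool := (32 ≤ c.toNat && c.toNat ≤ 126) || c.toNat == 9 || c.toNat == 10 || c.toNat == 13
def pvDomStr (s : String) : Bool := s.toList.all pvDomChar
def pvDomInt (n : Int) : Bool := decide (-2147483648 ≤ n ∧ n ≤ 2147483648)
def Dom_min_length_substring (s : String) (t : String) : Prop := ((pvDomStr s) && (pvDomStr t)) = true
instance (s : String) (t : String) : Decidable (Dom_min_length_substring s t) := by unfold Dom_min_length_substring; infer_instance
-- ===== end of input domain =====

-- B replaces A's per-character-of-t rescans of s (plus final sort) by one counting pass over s (objective: faster).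

-- ===== PORT A =====
-- inner loop 'for i in range(0, len(s))': the scan stops (break) at the first i with char == s[i] and i not in char_locations
def pvAInner (sl : List Char) (locs : List Nat) (c : Char) : List Nat :=
  match (List.range sl.length).find? (fun i => c == sl.getD i ' ' && !(locs.contains i)) with
  | some i => locs ++ [i]
  | none => locs

def min_length_substring (s : String) (t : String) : Int :=
  let locs := t.toList.foldl (pvAInner s.toList) []
  let srt := PySem.List.sorted locs (fun x => x) false
  ((PySem.List.pyGetD srt (-1) 0 : Nat) : Int) - ((PySem.List.pyGetD srt 0 0 : Nat) : Int) + 1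

-- ===== PORT B =====
-- one pass over s; state = (need : multiset of still-needed chars of t, lo, hi)
def pvBStep (sl : List Char) (st : PySem.Dict Char Int × Option Int × Option Int) (i : Nat) :
    PySem.Dict Char Int × Option Int × Option Int :=
  let ch := sl.getD i ' '
  let k := st.1.getD ch 0
  if k > 0 then
    (st.1.insert ch (k - 1), (if st.2.1 = none then some (i : Int) else st.2.1), some (i : Int))
  else st

def min_length_substring_alt (s : String) (t : String) : Int :=
  let need := t.toList.foldl (fun d ch => d.insert ch (d.getD ch 0 + 1)) (PySem.Dict.empty)
  let res := (List.range s.toList.length).foldl (pvBStep s.toList) (need, none, none)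
  match res.2.1, res.2.2 with
  | some lo, some hi => hi - lo + 1
  | _, _ => 0

-- ===== PRECONDITION & SPEC =====
-- Pre_ excludes exactly the inputs where A raises IndexError (char_locations stays empty):
-- no character of t occurs in s (in particular t = "" or s = "").
def Pre_min_length_substring (s : String) (t : String) : Prop :=
  (t.toList.any (fun c => s.toList.contains c)) = true
instance (s : String) (t : String) : Decidable (Pre_min_length_substring s t) := by
  unfold Pre_min_length_substring; infer_instance

def pvWitness_min_length_substring : String × String := ("ab", "b")

def Spec_min_length_substring (s : String) (t : String) (out : Int) : Prop := out = min_length_substring_alt s t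
instance (s : String) (t : String) (out : Int) : Decidable (Spec_min_length_substring s t out) := by unfold Spec_min_length_substring; infer_instance

-- ===== CLAIM (what is proved, stated in full; the proofs are below) =====
def Claim_equal_min_length_substring : Prop := ∀ (s : String) (t : String), Dom_min_length_substring s t → Pre_min_length_substring s t → Spec_min_length_substring s t (min_length_substring s t)

-- ===== LEMMAS AND PROOFS =====

-- occurrence positions of character c in s, in increasing order
def pvOcc (sl : List Char) (c : Char) : List Nat :=
  (List.range sl.length).filter (fun i => sl.getD i ' ' == c)

-- "index i gets picked": i is among the first (count of s[i] in t) occurrences of s[i] in s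
def pvPb (sl tl : List Char) (i : Nat) : Bool :=
  decide (i ∈ (pvOcc sl (sl.getD i ' ')).take (tl.count (sl.getD i ' ')))

-- the picked indices below m, in increasing order
def pvPl (sl tl : List Char) (m : Nat) : List Nat := (List.range m).filter (pvPb sl tl)

lemma mem_pvOcc {sl : List Char} {c : Char} {i : Nat} :
    i ∈ pvOcc sl c ↔ i < sl.length ∧ sl.getD i ' ' = c := by
  simp [pvOcc, List.mem_filter, List.mem_range]

lemma pairwise_pvOcc (sl : List Char) (c : Char) : (pvOcc sl c).Pairwise (· < ·) :=
  List.Pairwise.filter _ (List.pairwise_lt_range)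

lemma nodup_pvOcc (sl : List Char) (c : Char) : (pvOcc sl c).Nodup :=
  (pairwise_pvOcc sl c).imp (fun h => Nat.ne_of_lt h)

lemma filter_filter' {α : Type} (l : List α) (p q : α → Bool) :
    l.filter (fun a => p a && q a) = (l.filter p).filter q := by
  induction l with
  | nil => rfl
  | cons a l ih =>
    by_cases hp : p a = true <;> by_cases hq : q a = true <;>
      simp [hp, hq, ih]

-- in a strictly increasing list, membership in the first k elements ↔ fewer than k smaller elements
lemma mem_take_iff_filter_lt {l : List Nat} (hp : l.Pairwise (· < ·)) {m : Nat} (hm : m ∈ l) :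
    ∀ k, m ∈ l.take k ↔ (l.filter (fun i => decide (i < m))).length < k := by
  induction l with
  | nil => cases hm
  | cons a l ih =>
    intro k
    rcases List.pairwise_cons.1 hp with ⟨ha, hp'⟩
    rcases List.mem_cons.1 hm with rfl | hm'
    · have hnil : l.filter (fun i => decide (i < m)) = [] :=
        List.filter_eq_nil_iff.2 (fun x hx => by simpa using Nat.not_lt.2 (le_of_lt (ha x hx)))
      cases k with
      | zero => simp
      | succ k => simp [hnil]
    · have ham : a < m := ha m hm'
      cases k with
      | zero => simp
      | succ k =>
        have hne : m ≠ a := Nat.ne_of_gt ham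
        have hih := ih hp' hm' k
        simp only [List.take_succ_cons, List.mem_cons, List.filter_cons, ham, decide_true,
          if_true, List.length_cons, hne, false_or]
        rw [hih]
        omega

lemma filter_lt_succ_length (l : List Nat) (m : Nat) :
    (l.filter (fun i => decide (i < m + 1))).length
      = (l.filter (fun i => decide (i < m))).length + l.count m := by
  induction l with
  | nil => simp
  | cons a l ih =>
    simp only [List.filter_cons, List.count_cons]
    split_ifs with h1 h2 h2 <;> simp_all <;> omega

-- ===== A side =====

lemma head?_filter_not_mem_take {l : List Nat} (hnd : l.Nodup) (k : Nat) :
    (l.filter (fun i => !(decide (i ∈ l.take k)))).head? = (l.drop k).head? := by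
  have hsplit : l.take k ++ l.drop k = l := List.take_append_drop k l
  have hnd2 : (l.take k ++ l.drop k).Nodup := by rw [hsplit]; exact hnd
  have hdisj : ∀ x ∈ l.take k, x ∉ l.drop k := by
    intro x h1 h2
    exact (List.disjoint_of_nodup_append hnd2) h1 h2
  have h1 : (l.take k).filter (fun i => !(decide (i ∈ l.take k))) = [] :=
    List.filter_eq_nil_iff.2 (fun x hx => by simp [hx])
  calc (l.filter (fun i => !(decide (i ∈ l.take k)))).head?
      = ((l.take k ++ l.drop k).filter (fun i => !(decide (i ∈ l.take k)))).head? := by rw [hsplit]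
    _ = ((l.drop k).filter (fun i => !(decide (i ∈ l.take k)))).head? := by
        rw [List.filter_append, h1, List.nil_append]
    _ = (l.drop k).head? := by
        cases hdr : l.drop k with
        | nil => simp
        | cons d ds =>
          have hd : d ∉ l.take k := by
            intro hmem
            refine hdisj d hmem ?_
            rw [hdr]
            exact List.mem_cons_self
          simp [hd]

lemma pvAInner_filter (sl : List Char) (locs : List Nat) (c : Char) (k : Char → Nat)
    (H : ∀ c', locs.filter (fun i => sl.getD i ' ' == c') = (pvOcc sl c').take (k c')) :
    ∀ c', (pvAInner sl locs c).filter (fun i => sl.getD i ' ' == c')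
      = (pvOcc sl c').take (if c' = c then k c' + 1 else k c') := by
  have hmemloc : ∀ i, sl.getD i ' ' = c → (i ∈ locs ↔ i ∈ (pvOcc sl c).take (k c)) := by
    intro i hi
    constructor
    · intro h
      have h2 : i ∈ locs.filter (fun j => sl.getD j ' ' == c) :=
        List.mem_filter.2 ⟨h, by simp only [beq_iff_eq]; exact hi⟩
      rwa [H c] at h2
    · intro h
      have h2 : i ∈ locs.filter (fun j => sl.getD j ' ' == c) := by rw [H c]; exact h
      exact (List.mem_filter.1 h2).1
  have hpred : ∀ i ∈ List.range sl.length,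
      (c == sl.getD i ' ' && !(locs.contains i))
        = (sl.getD i ' ' == c && !(decide (i ∈ (pvOcc sl c).take (k c)))) := by
    intro i _
    by_cases hi : sl.getD i ' ' = c
    · have hmem := hmemloc i hi
      have hcontains : locs.contains i = decide (i ∈ (pvOcc sl c).take (k c)) := by
        by_cases h : i ∈ locs
        · simp [h, hmem.1 h]
        · have h2 : i ∉ (pvOcc sl c).take (k c) := fun hh => h (hmem.2 hh)
          simp [h, h2]
      rw [hcontains, show (c == sl.getD i ' ') = (sl.getD i ' ' == c) from Bool.beq_comm]
    · have hb1 : (c == sl.getD i ' ') = false := beq_eq_false_iff_ne.mpr (Ne.symm hi)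
      have hb2 : (sl.getD i ' ' == c) = false := beq_eq_false_iff_ne.mpr hi
      rw [hb1, hb2, Bool.false_and, Bool.false_and]
  have hocc : (List.range sl.length).filter (fun i => sl.getD i ' ' == c) = pvOcc sl c := rfl
  have hfind : (List.range sl.length).find? (fun i => c == sl.getD i ' ' && !(locs.contains i))
      = ((pvOcc sl c).drop (k c)).head? := by
    rw [← List.head?_filter, List.filter_congr hpred, filter_filter', hocc]
    exact head?_filter_not_mem_take (nodup_pvOcc sl c) (k c)
  intro c'
  cases hdr : (pvOcc sl c).drop (k c) with
  | nil =>
    have hf : (List.range sl.length).find? (fun i => c == sl.getD i ' ' && !(locs.contains i)) = none := by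
      rw [hfind, hdr]; rfl
    have hlen : (pvOcc sl c).length ≤ k c := List.drop_eq_nil_iff.mp hdr
    simp only [pvAInner, hf]
    rw [H c']
    by_cases hcc : c' = c
    · subst hcc
      rw [if_pos rfl, List.take_of_length_le hlen, List.take_of_length_le (le_trans hlen (Nat.le_succ _))]
    · rw [if_neg hcc]
  | cons i0 rest =>
    have hf : (List.range sl.length).find? (fun i => c == sl.getD i ' ' && !(locs.contains i)) = some i0 := by
      rw [hfind, hdr]; rfl
    have hi0drop : i0 ∈ (pvOcc sl c).drop (k c) := by rw [hdr]; exact List.mem_cons_self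
    have hi0occ : i0 ∈ pvOcc sl c := List.mem_of_mem_drop hi0drop
    have hchar : sl.getD i0 ' ' = c := (mem_pvOcc.1 hi0occ).2
    have hchar2 : sl[i0]?.getD ' ' = c := hchar
    simp only [pvAInner, hf]
    rw [List.filter_append, H c']
    by_cases hcc : c' = c
    · subst hcc
      rw [if_pos rfl]
      have hget : (pvOcc sl c')[k c']? = some i0 := by
        have h0 : ((pvOcc sl c').drop (k c')).head? = some i0 := by rw [hdr]; rfl
        rwa [List.head?_drop] at h0
      rw [List.take_add_one, hget]
      simp [hchar2]
    · rw [if_neg hcc]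
      have : [i0].filter (fun i => sl.getD i ' ' == c') = [] := by
        simp [hchar2, Ne.symm hcc]
      rw [this, List.append_nil]

lemma A_locs_aux (sl : List Char) : ∀ (tl : List Char) (locs : List Nat) (k : Char → Nat),
    (∀ c', locs.filter (fun i => sl.getD i ' ' == c') = (pvOcc sl c').take (k c')) →
    ∀ c, (tl.foldl (pvAInner sl) locs).filter (fun i => sl.getD i ' ' == c)
      = (pvOcc sl c).take (k c + tl.count c) := by
  intro tl
  induction tl with
  | nil => intro locs k H c; simpa using H c
  | cons a tl ih =>
    intro locs k H c
    have hstep := ih (pvAInner sl locs a) (fun c' => if c' = a then k c' + 1 else k c')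
      (pvAInner_filter sl locs a k H) c
    rw [List.foldl_cons, hstep]
    congr 1
    by_cases h : c = a
    · rw [if_pos h, List.count_cons, if_pos (by simp [h])]
      omega
    · rw [if_neg h, List.count_cons, if_neg (by simp [Ne.symm h])]
      omega

lemma A_locs (sl : List Char) (tl : List Char) :
    ∀ c, (tl.foldl (pvAInner sl) []).filter (fun i => sl.getD i ' ' == c)
      = (pvOcc sl c).take (tl.count c) := by
  intro c
  have := A_locs_aux sl tl [] (fun _ => 0) (fun c' => by simp) c
  simpa using this

lemma A_nodup (sl tl : List Char) : (tl.foldl (pvAInner sl) []).Nodup := by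
  rw [List.nodup_iff_count_le_one]
  intro a
  by_cases ha : a ∈ tl.foldl (pvAInner sl) []
  · have h1 : (tl.foldl (pvAInner sl) []).count a
        = ((tl.foldl (pvAInner sl) []).filter (fun i => sl.getD i ' ' == sl.getD a ' ')).count a := by
      rw [List.count_filter]; simp
    rw [h1, A_locs]
    exact List.nodup_iff_count_le_one.1
      ((nodup_pvOcc sl (sl.getD a ' ')).sublist (List.take_sublist _ _)) a
  · simp [List.count_eq_zero.mpr ha]

lemma A_mem (sl tl : List Char) (i : Nat) :
    i ∈ tl.foldl (pvAInner sl) [] ↔ i ∈ pvPl sl tl sl.length := by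
  constructor
  · intro h
    have h1 : i ∈ (tl.foldl (pvAInner sl) []).filter (fun j => sl.getD j ' ' == sl.getD i ' ') :=
      List.mem_filter.2 ⟨h, by simp⟩
    rw [A_locs] at h1
    have hio : i ∈ pvOcc sl (sl.getD i ' ') := List.mem_of_mem_take h1
    refine List.mem_filter.2 ⟨List.mem_range.2 (mem_pvOcc.1 hio).1, ?_⟩
    unfold pvPb
    exact decide_eq_true h1
  · intro h
    rcases List.mem_filter.1 h with ⟨_, hpb⟩
    have h1 : i ∈ (pvOcc sl (sl.getD i ' ')).take (tl.count (sl.getD i ' ')) := of_decide_eq_true hpb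
    have h2 : i ∈ (tl.foldl (pvAInner sl) []).filter (fun j => sl.getD j ' ' == sl.getD i ' ') := by
      rw [A_locs]; exact h1
    exact (List.mem_filter.1 h2).1

lemma A_sorted (sl tl : List Char) :
    PySem.List.sorted (tl.foldl (pvAInner sl) []) (fun x => x) false = pvPl sl tl sl.length := by
  apply PySem.List.sorted_eq_of_perm_of_pairwise_lt
  · exact (List.perm_ext_iff_of_nodup (List.Nodup.filter _ List.nodup_range) (A_nodup sl tl)).2
      (fun a => (A_mem sl tl a).symm)
  · exact List.Pairwise.filter _ List.pairwise_lt_range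

-- ===== B side =====

lemma pvPl_succ (sl tl : List Char) (m : Nat) :
    pvPl sl tl (m+1) = pvPl sl tl m ++ if pvPb sl tl m then [m] else [] := by
  unfold pvPl
  rw [List.range_succ, List.filter_append]
  congr 1
  by_cases h : pvPb sl tl m = true <;> simp [h]

lemma pb_iff (sl tl : List Char) (m : Nat) (hm : m < sl.length) :
    pvPb sl tl m = true
      ↔ ((pvOcc sl (sl.getD m ' ')).filter (fun i => decide (i < m))).length
          < tl.count (sl.getD m ' ') := by
  unfold pvPb
  rw [decide_eq_true_eq]
  exact mem_take_iff_filter_lt (pairwise_pvOcc sl _) (mem_pvOcc.2 ⟨hm, rfl⟩) _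

lemma B_inv (sl tl : List Char) :
    ∀ m, m ≤ sl.length →
      (∀ c, ((List.range m).foldl (pvBStep sl)
          (tl.foldl (fun d ch => d.insert ch (d.getD ch 0 + 1)) PySem.Dict.empty, none, none)).1.getD c 0
        = (tl.count c : Int) - ((min (tl.count c) (((pvOcc sl c).filter (fun i => decide (i < m))).length) : Nat) : Int)) ∧
      ((List.range m).foldl (pvBStep sl)
          (tl.foldl (fun d ch => d.insert ch (d.getD ch 0 + 1)) PySem.Dict.empty, none, none)).2.1
        = ((pvPl sl tl m).head?).map (fun i => (i : Int)) ∧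
      ((List.range m).foldl (pvBStep sl)
          (tl.foldl (fun d ch => d.insert ch (d.getD ch 0 + 1)) PySem.Dict.empty, none, none)).2.2
        = ((pvPl sl tl m).getLast?).map (fun i => (i : Int)) := by
  intro m
  induction m with
  | zero =>
    intro _
    refine ⟨?_, by simp [pvPl], by simp [pvPl]⟩
    intro c
    simp [PySem.Dict.getD_foldl_insert_add_one, PySem.Dict.getD_empty]
  | succ m ih =>
    intro hm1
    have hm : m < sl.length := hm1
    obtain ⟨h1, h2, h3⟩ := ih (le_of_lt hm)
    rw [List.range_succ, List.foldl_append, List.foldl_cons, List.foldl_nil]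
    set F := (List.range m).foldl (pvBStep sl)
      (tl.foldl (fun d ch => d.insert ch (d.getD ch 0 + 1)) PySem.Dict.empty, none, none) with hF
    set ch := sl.getD m ' ' with hch
    have hmocc : m ∈ pvOcc sl ch := mem_pvOcc.2 ⟨hm, rfl⟩
    have hcnt1 : (pvOcc sl ch).count m = 1 := List.count_eq_one_of_mem (nodup_pvOcc sl ch) hmocc
    have hLsucc : ∀ c, ((pvOcc sl c).filter (fun i => decide (i < m + 1))).length
        = ((pvOcc sl c).filter (fun i => decide (i < m))).length + (pvOcc sl c).count m :=
      fun c => filter_lt_succ_length (pvOcc sl c) m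
    have hother : ∀ c, c ≠ ch → (pvOcc sl c).count m = 0 := by
      intro c hc
      apply List.count_eq_zero.mpr
      intro hmem
      exact hc ((mem_pvOcc.1 hmem).2.symm ▸ rfl)
    by_cases hpb : pvPb sl tl m = true
    · have hlt : ((pvOcc sl ch).filter (fun i => decide (i < m))).length < tl.count ch :=
        (pb_iff sl tl m hm).1 hpb
      have hk : F.1.getD ch 0 > 0 := by
        rw [h1 ch]
        have : min (tl.count ch) (((pvOcc sl ch).filter (fun i => decide (i < m))).length)
            = ((pvOcc sl ch).filter (fun i => decide (i < m))).length := min_eq_right (le_of_lt hlt)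
        rw [this]
        omega
      have hstep : pvBStep sl F m
          = (F.1.insert ch (F.1.getD ch 0 - 1),
             (if F.2.1 = none then some (m : Int) else F.2.1), some (m : Int)) := by
        simp only [pvBStep, ← hch]
        rw [if_pos hk]
      rw [hstep]
      refine ⟨?_, ?_, ?_⟩
      · intro c
        rw [PySem.Dict.getD_insert]
        by_cases hc : c = ch
        · rw [if_pos hc, h1 ch, hc, hLsucc ch, hcnt1]
          rw [min_eq_right (le_of_lt hlt), min_eq_right hlt]
          push_cast
          ring
        · rw [if_neg hc, h1 c, hLsucc c, hother c hc, Nat.add_zero]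
      · rw [h2, pvPl_succ, if_pos hpb]
        cases hpl : pvPl sl tl m with
        | nil => simp
        | cons x xs => simp [List.cons_append]
      · rw [pvPl_succ, if_pos hpb, List.getLast?_concat]
        rfl
    · have hge : tl.count ch ≤ ((pvOcc sl ch).filter (fun i => decide (i < m))).length := by
        by_contra hcon
        exact hpb ((pb_iff sl tl m hm).2 (Nat.lt_of_not_le hcon))
      have hk : ¬ (F.1.getD ch 0 > 0) := by
        rw [h1 ch, min_eq_left hge]
        omega
      have hstep : pvBStep sl F m = F := by
        simp only [pvBStep, ← hch]
        rw [if_neg hk]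
      rw [hstep]
      have hplsame : pvPl sl tl (m+1) = pvPl sl tl m := by
        rw [pvPl_succ, if_neg hpb, List.append_nil]
      refine ⟨?_, by rw [h2, hplsame], by rw [h3, hplsame]⟩
      intro c
      rw [h1 c, hLsucc c]
      by_cases hc : c = ch
      · subst hc
        rw [hcnt1, min_eq_left hge, min_eq_left (le_trans hge (Nat.le_succ _))]
      · rw [hother c hc, Nat.add_zero]

lemma pl_ne_nil (sl tl : List Char) (h : ∃ c ∈ tl, c ∈ sl) : pvPl sl tl sl.length ≠ [] := by
  obtain ⟨c, hct, hcs⟩ := h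
  obtain ⟨i, hi, hieq⟩ := List.mem_iff_getElem.mp hcs
  have hgd : sl.getD i ' ' = c := by rw [List.getD_eq_getElem _ _ hi]; exact hieq
  have hiocc : i ∈ pvOcc sl c := mem_pvOcc.2 ⟨hi, hgd⟩
  obtain ⟨j, js, hj⟩ := List.exists_cons_of_ne_nil (List.ne_nil_of_mem hiocc)
  have hjocc : j ∈ pvOcc sl c := by rw [hj]; exact List.mem_cons_self
  have hcnt : 0 < tl.count c := List.count_pos_iff.2 hct
  obtain ⟨n, hn⟩ := Nat.exists_eq_succ_of_ne_zero (Nat.pos_iff_ne_zero.1 hcnt)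
  have hjtake : j ∈ (pvOcc sl c).take (tl.count c) := by
    rw [hj, hn, List.take_succ_cons]
    exact List.mem_cons_self
  have hchar_j : sl.getD j ' ' = c := (mem_pvOcc.1 hjocc).2
  have hpbj : pvPb sl tl j = true := by
    unfold pvPb
    rw [hchar_j]
    exact decide_eq_true hjtake
  exact List.ne_nil_of_mem
    (List.mem_filter.2 ⟨List.mem_range.2 (mem_pvOcc.1 hjocc).1, hpbj⟩)

-- ===== VERDICT (by name: the statement is the Claim_ definition above) =====
theorem min_length_substring_spec : Claim_equal_min_length_substring := by
  unfold Claim_equal_min_length_substring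
  intro s t _ hpre
  unfold Spec_min_length_substring
  obtain ⟨_, h2, h3⟩ := B_inv s.toList t.toList s.toList.length le_rfl
  have hA := A_sorted s.toList t.toList
  have hne := pl_ne_nil s.toList t.toList (by
    obtain ⟨c, hc1, hc2⟩ := List.any_eq_true.1 hpre
    exact ⟨c, hc1, by simpa using hc2⟩)
  obtain ⟨x, xs, hx⟩ := List.exists_cons_of_ne_nil hne
  simp only [min_length_substring, min_length_substring_alt]
  rw [hA, h2, h3, hx]
  rw [PySem.List.pyGetD_neg_one (x :: xs) 0 (List.cons_ne_nil x xs), PySem.List.pyGetD_zero]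
  rw [List.getLast?_eq_some_getLast (List.cons_ne_nil x xs)]
  simp [List.getD]
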